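-- pv_equiv track=rewrite | github.com/sjh146/editor_dd | app.py | has_repetition
-- ===== SOURCE A (Python) =====
-- def has_repetition(text, threshold=3):
--     """텍스트에 반복이 있는지 확인 (프레임 분석용)"""
--     if not text:
--         return False
--
--     words = text.split()
--     if len(words) < threshold:
--         return False
--
--     # 같은 단어가 연속으로 3번 이상 반복되는지 확인
--     for i in range(len(words) - threshold + 1):
--         if len(set(words[i:i+threshold])) == 1:
--             return True
--
--     # 같은 구문이 반복되는지 확인 (2-3단어)
--     for i in range(len(words) - 4):
--         phrase1 = " ".join(words[i:i+2])
--         phrase2 = " ".join(words[i+2:i+4])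
--         if phrase1 == phrase2:
--             return True
--
--     return False
-- ===== SOURCE B (Python) =====
-- def has_repetition(text, threshold=3):
--     if not text:
--         return False
--     words = text.split()
--     if len(words) < threshold:
--         return False
--     # single-word runs: one pass with a consecutive-run counter
--     if threshold >= 1:
--         run = 0
--         prev = None
--         for w in words:
--             run = run + 1 if w == prev else 1
--             prev = w
--             if run >= threshold:
--                 return True
--     # 2-word phrase repetition: direct index comparison (split words contain no spaces)
--     for i in range(len(words) - 4):
--         if words[i] == words[i + 2] and words[i + 1] == words[i + 3]:
--             return True
--     return False
-- ===== Notes on version B (the rewrite author's own statement) =====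
-- stated objective: alternative
-- what changed: The set-per-window scan is replaced by a single left-to-right pass maintaining a consecutive-run counter, and the joined-phrase comparison is replaced by direct index comparisons of the words.
-- outside the precondition, e.g. on has_repetition('a b c', -2): A returns True, B returns False
import Mathlib
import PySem

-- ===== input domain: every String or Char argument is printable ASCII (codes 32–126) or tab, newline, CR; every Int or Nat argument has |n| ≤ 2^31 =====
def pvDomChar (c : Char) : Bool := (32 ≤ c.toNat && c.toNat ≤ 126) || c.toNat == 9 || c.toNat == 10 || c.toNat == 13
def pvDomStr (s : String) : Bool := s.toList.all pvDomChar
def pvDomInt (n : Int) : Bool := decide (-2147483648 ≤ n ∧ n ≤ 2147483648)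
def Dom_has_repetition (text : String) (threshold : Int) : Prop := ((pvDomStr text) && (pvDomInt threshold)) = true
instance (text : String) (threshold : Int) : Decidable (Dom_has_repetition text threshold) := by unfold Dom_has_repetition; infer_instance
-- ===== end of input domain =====

-- B replaces A's set-per-window scan by a single-pass consecutive-run counter and the joined-phrase
-- comparison by direct index comparisons (objective: alternative decomposition of the same detection).

-- ===== PORT A =====
def has_repetition (text : String) (threshold : Int) : Bool :=
  if text == "" then false
  else
    let words := PySem.Str.split₀ text
    if (words.length : Int) < threshold then false
    else if (PySem.List.pyRange 0 ((words.length : Int) - threshold + 1) 1).any (fun i =>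
        (PySem.Set.ofList (PySem.List.slice words (some i) (some (i + threshold)))).length == 1) then true
    else if (PySem.List.pyRange 0 ((words.length : Int) - 4) 1).any (fun i =>
        PySem.Str.join " " (PySem.List.slice words (some i) (some (i + 2))) ==
        PySem.Str.join " " (PySem.List.slice words (some (i + 2)) (some (i + 4)))) then true
    else false

-- ===== PORT B =====
-- run-counter loop of Source B ('for w in words' with early return; prev starts as None)
def pvAltRun (threshold : Int) : List String → Option String → Int → Bool
  | [], _, _ => false
  | w :: ws, prev, run =>
    let run' := if some w == prev then run + 1 else 1
    if threshold ≤ run' then true else pvAltRun threshold ws (some w) run'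

-- phrase loop of Source B; indices i..i+3 are always in range there, so pyGetD's default is never used
def pvAltPhrase (words : List String) : Bool :=
  (PySem.List.pyRange 0 ((words.length : Int) - 4) 1).any (fun i =>
    (PySem.List.pyGetD words i "" == PySem.List.pyGetD words (i + 2) "") &&
    (PySem.List.pyGetD words (i + 1) "" == PySem.List.pyGetD words (i + 3) ""))

def has_repetition_alt (text : String) (threshold : Int) : Bool :=
  if text == "" then false
  else
    let words := PySem.Str.split₀ text
    if (words.length : Int) < threshold then false
    else if 1 ≤ threshold && pvAltRun threshold words none 0 then true
    else pvAltPhrase words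

-- ===== PRECONDITION & SPEC =====
-- Pre_ excludes negative thresholds: a repetition count below zero is outside the task's natural
-- domain, and there A's slice end i+threshold becomes a Python negative index that wraps around,
-- so A can report a repetition that is an accident of slicing; B does not mirror that.
def Pre_has_repetition (text : String) (threshold : Int) : Prop := 0 ≤ threshold
instance (text : String) (threshold : Int) : Decidable (Pre_has_repetition text threshold) := by unfold Pre_has_repetition; infer_instance
def pvWitness_has_repetition : String × Int := ("go go go stop", 3)

def Spec_has_repetition (text : String) (threshold : Int) (out : Bool) : Prop := out = has_repetition_alt text threshold
instance (text : String) (threshold : Int) (out : Bool) : Decidable (Spec_has_repetition text threshold out) := by unfold Spec_has_repetition; infer_instance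

-- ===== CLAIM (what is proved, stated in full; the proofs are below) =====
def Claim_equal_has_repetition : Prop := ∀ (text : String) (threshold : Int), Dom_has_repetition text threshold → Pre_has_repetition text threshold → Spec_has_repetition text threshold (has_repetition text threshold)

-- ===== LEMMAS AND PROOFS =====

-- split() output contains no whitespace characters
theorem pv_nospace_go (s cur : List Char) (acc : List (List Char))
    (hacc : ∀ w ∈ acc, ∀ c ∈ w, PySem.Chars.isspace c = false)
    (hcur : ∀ c ∈ cur, PySem.Chars.isspace c = false) :
    ∀ w ∈ PySem.Chars.split₀.go s cur acc, ∀ c ∈ w, PySem.Chars.isspace c = false := by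
  induction s generalizing cur acc with
  | nil =>
    intro w hw
    simp only [PySem.Chars.split₀.go] at hw
    split at hw
    · simp at hw; exact hacc _ (by simpa using hw)
    · simp at hw
      rcases hw with hw | hw
      · exact hacc _ hw
      · subst hw; intro c hc; exact hcur c (by simpa using hc)
  | cons c rest ih =>
    intro w hw
    simp only [PySem.Chars.split₀.go] at hw
    split at hw
    · rename_i hsp
      split at hw
      · exact ih _ _ hacc (by simp) w hw
      · refine ih _ _ ?_ (by simp) w hw
        intro w' hw'
        simp at hw'
        rcases hw' with hw' | hw'
        · subst hw'; intro c' hc'; exact hcur c' (by simpa using hc')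
        · exact hacc _ hw'
    · rename_i hsp
      refine ih _ _ hacc ?_ w hw
      intro c' hc'
      simp at hc'
      rcases hc' with rfl | hc'
      · simpa using hsp -- hsp : isspace c = false for the branch char
      · exact hcur _ hc'

theorem pv_nospace_split (text w : String) (hw : w ∈ PySem.Str.split₀ text) :
    ' ' ∉ w.toList := by
  intro hsp
  have hmem : w.toList ∈ PySem.Chars.split₀ text.toList := by
    have : w.toList ∈ (PySem.Str.split₀ text).map String.toList := List.mem_map_of_mem hw
    simpa [PySem.Str.split₀_map_toList] using this
  have := pv_nospace_go text.toList [] [] (by simp) (by simp) w.toList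
    (by simpa [PySem.Chars.split₀] using hmem) ' ' hsp
  simp [PySem.Chars.isspace] at this

-- unique splitting at a separator character absent from both prefixes
theorem pv_sep_unique : ∀ (as cs bs ds : List Char), ' ' ∉ as → ' ' ∉ cs →
    as ++ ' ' :: bs = cs ++ ' ' :: ds → as = cs ∧ bs = ds := by
  intro as
  induction as with
  | nil =>
    intro cs bs ds _ hc h
    cases cs with
    | nil => simpa using h
    | cons c cs' =>
      simp at h
      exact absurd (by simp [← h.1]) hc
  | cons a as' ih =>
    intro cs bs ds ha hc h
    cases cs with
    | nil =>
      simp at h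
      exact absurd (by simp [h.1]) ha
    | cons c cs' =>
      simp at h
      obtain ⟨rfl, h2⟩ := h
      simp at ha hc
      have := ih cs' bs ds ha.2 hc.2 h2
      simp [this.1, this.2]

-- len(set(xs)) == 1 means: xs is nonempty and constant
theorem pv_setlen_one_iff (xs : List String) :
    (PySem.Set.ofList xs).length = 1 ↔ ∃ a, xs ≠ [] ∧ ∀ x ∈ xs, x = a := by
  constructor
  · intro h
    obtain ⟨a, ha⟩ := List.length_eq_one_iff.mp h
    refine ⟨a, ?_, ?_⟩
    · intro hnil; subst hnil; simp [PySem.Set.ofList] at ha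
    · intro x hx
      have : x ∈ PySem.Set.ofList xs := by
        rw [PySem.Set.mem_ofList]; exact hx
      rw [ha] at this; simpa using this
  · rintro ⟨a, hne, hall⟩
    have hmem : ∀ x ∈ PySem.Set.ofList xs, x = a := by
      intro x hx
      exact hall x (by rwa [PySem.Set.mem_ofList] at hx)
    have hnd : (PySem.Set.ofList xs).Nodup := PySem.Set.nodup_ofList xs
    have hne' : PySem.Set.ofList xs ≠ [] := by
      cases xs with
      | nil => simp at hne
      | cons y ys =>
        intro h
        have : y ∈ PySem.Set.ofList (y :: ys) := by rw [PySem.Set.mem_ofList]; simp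
        simp [h] at this
    match hl : PySem.Set.ofList xs, hnd, hne', hmem with
    | [], _, hne', _ => simp at hne'
    | [x], _, _, _ => rfl
    | x :: y :: t, hnd, _, hmem =>
      have hx := hmem x (by simp)
      have hy := hmem y (by simp)
      subst hx; rw [hy] at hnd; simp at hnd

theorem pv_repl_prefix_bound (p w : String) (hw : w ≠ p) :
    ∀ (t r : Nat) (ws : List String),
      List.replicate t p <+: (List.replicate r p ++ w :: ws) → t ≤ r := by
  intro t
  induction t with
  | zero => intro r ws _; omega
  | succ t ih =>
    intro r ws h
    cases r with
    | zero =>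
      simp [List.replicate_succ, List.cons_prefix_cons] at h
      exact absurd h.1.symm hw
    | succ r =>
      simp only [List.replicate_succ, List.cons_append, List.cons_prefix_cons] at h
      have := ih r ws h.2
      omega

-- a constant run longer than the leading block must sit past a breaking element
theorem pv_repl_infix_split (a p w : String) (hw : w ≠ p) :
    ∀ (r t : Nat) (ws : List String),
      List.replicate t a <:+: (List.replicate r p ++ w :: ws) →
      t ≤ r ∨ List.replicate t a <:+: w :: ws := by
  intro r
  induction r with
  | zero => intro t ws h; right; simpa using h
  | succ r ih =>
    intro t ws h
    rw [List.replicate_succ, List.cons_append, List.infix_cons_iff] at h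
    rcases h with h | h
    · cases t with
      | zero => left; omega
      | succ t =>
        rw [List.replicate_succ, List.cons_prefix_cons] at h
        obtain ⟨ha1, h2⟩ := h
        rw [ha1] at h2
        have := pv_repl_prefix_bound p w hw t r ws h2
        left; omega
    · rcases ih t ws h with h' | h'
      · left; omega
      · right; exact h'

-- invariant of B's run counter: r consecutive copies of p directly precede ws
theorem pv_altRun_iff (t' : Nat) :
    ∀ (ws : List String) (p : String) (r : Nat), 1 ≤ r → r < t' →
      (pvAltRun (t' : Int) ws (some p) (r : Int) = true ↔
        ∃ a, List.replicate t' a <:+: (List.replicate r p ++ ws)) := by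
  intro ws
  induction ws with
  | nil =>
    intro p r hr1 hrt
    simp only [pvAltRun, List.append_nil]
    constructor
    · intro h; simp at h
    · rintro ⟨a, h⟩
      have := h.length_le
      simp at this
      omega
  | cons w ws ih =>
    intro p r hr1 hrt
    simp only [pvAltRun]
    by_cases hwp : w = p
    · subst hwp
      simp only [beq_self_eq_true, if_true]
      by_cases hle : (t' : Int) ≤ (r : Int) + 1
      · have ht : t' = r + 1 := by omega
        rw [if_pos hle]
        constructor
        · intro _
          refine ⟨w, ?_⟩
          rw [ht, List.replicate_succ']
          exact (by simpa using (List.prefix_append (List.replicate r w ++ [w]) ws) :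
            List.replicate r w ++ [w] <+: List.replicate r w ++ w :: ws).isInfix
        · intro _; rfl
      · rw [if_neg hle]
        have : ((r : Int) + 1) = ((r + 1 : Nat) : Int) := by push_cast; ring
        rw [this]
        rw [ih w (r + 1) (by omega) (by omega)]
        constructor
        · rintro ⟨a, h⟩
          refine ⟨a, ?_⟩
          rwa [List.replicate_succ', List.append_assoc, List.singleton_append] at h
        · rintro ⟨a, h⟩
          refine ⟨a, ?_⟩
          rwa [List.replicate_succ', List.append_assoc, List.singleton_append]
    · have hbeq : (some w == some p) = false := by simp [hwp]
      simp only [hbeq]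
      have hone : (if ((false : Bool) = true) then (r : Int) + 1 else 1) = 1 := by simp
      rw [hone]
      have h2t : 2 ≤ t' := by omega
      have hle : ¬ ((t' : Int) ≤ (1 : Int)) := by exact_mod_cast by omega
      rw [if_neg hle]
      have h1 : (1 : Int) = ((1 : Nat) : Int) := by norm_num
      rw [h1, ih w 1 (le_refl 1) (by omega)]
      simp only [List.replicate_one, List.singleton_append]
      constructor
      · rintro ⟨a, h⟩
        exact ⟨a, h.trans (List.suffix_append _ _).isInfix⟩
      · rintro ⟨a, h⟩
        rcases pv_repl_infix_split a p w hwp r t' ws h with h' | h'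
        · omega
        · exact ⟨a, h'⟩

theorem pv_altRun_top (words : List String) (t : Int) (ht1 : 1 ≤ t)
    (htn : t ≤ (words.length : Int)) :
    pvAltRun t words none 0 = true ↔ ∃ a, List.replicate t.toNat a <:+: words := by
  obtain ⟨t', rfl⟩ : ∃ t' : Nat, t = (t' : Int) := ⟨t.toNat, (Int.toNat_of_nonneg (by omega)).symm⟩
  have ht1' : 1 ≤ t' := by exact_mod_cast ht1
  cases words with
  | nil => simp at htn; omega
  | cons w ws =>
    simp only [pvAltRun]
    have hbeq : (some w == (none : Option String)) = false := by rfl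
    rw [hbeq]
    have hone : (if ((false : Bool) = true) then (0 : Int) + 1 else 1) = 1 := by simp
    rw [hone]
    simp only [Int.toNat_natCast]
    by_cases hle : (t' : Int) ≤ 1
    · rw [if_pos hle]
      have : t' = 1 := by omega
      subst this
      simp only [List.replicate_one]
      exact ⟨fun _ => ⟨w, (List.prefix_append [w] ws).isInfix⟩, fun _ => by simp⟩
    · rw [if_neg hle]
      have h1 : (1 : Int) = ((1 : Nat) : Int) := by norm_num
      rw [h1, pv_altRun_iff t' ws w 1 (le_refl 1) (by exact_mod_cast by omega)]
      simp only [List.replicate_one, List.singleton_append]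

-- A's windowed scan fires exactly on a constant run of length threshold
theorem pv_anyA_iff (words : List String) (t : Int) (ht1 : 1 ≤ t)
    (htn : t ≤ (words.length : Int)) :
    ((PySem.List.pyRange 0 ((words.length : Int) - t + 1) 1).any (fun i =>
        (PySem.Set.ofList (PySem.List.slice words (some i) (some (i + t)))).length == 1)) = true
      ↔ ∃ a, List.replicate t.toNat a <:+: words := by
  rw [List.any_eq_true]
  constructor
  · rintro ⟨i, hi, hpred⟩
    rw [PySem.List.mem_pyRange_one] at hi
    obtain ⟨h0, hlt⟩ := hi
    rw [PySem.List.slice_toNat words h0 (by omega)] at hpred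
    have hadd : (i + t).toNat = i.toNat + t.toNat := by omega
    rw [hadd] at hpred
    simp only [Nat.add_sub_cancel_left] at hpred
    rw [beq_iff_eq, pv_setlen_one_iff] at hpred
    obtain ⟨a, hne, hall⟩ := hpred
    refine ⟨a, ?_⟩
    have hklen : i.toNat + t.toNat ≤ words.length := by omega
    have hlen : ((words.drop i.toNat).take t.toNat).length = t.toNat := by
      simp [List.length_take, List.length_drop]; omega
    have hrepl : (words.drop i.toNat).take t.toNat = List.replicate t.toNat a :=
      List.eq_replicate_iff.mpr ⟨hlen, hall⟩
    rw [← hrepl]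
    exact (List.take_prefix _ _).isInfix.trans (List.drop_suffix _ _).isInfix
  · rintro ⟨a, hinf⟩
    obtain ⟨s, u, hsu⟩ := hinf
    have hn : words.length = s.length + t.toNat + u.length := by
      rw [← hsu]; simp; omega
    refine ⟨(s.length : Int), ?_, ?_⟩
    · rw [PySem.List.mem_pyRange_one]
      constructor
      · omega
      · omega
    · have h0 : (0 : Int) ≤ (s.length : Int) := by omega
      rw [PySem.List.slice_toNat words h0 (by omega)]
      have hadd : ((s.length : Int) + t).toNat = s.length + t.toNat := by omega
      rw [hadd, Int.toNat_natCast]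
      simp only [Nat.add_sub_cancel_left]
      have hdrop : words.drop s.length = List.replicate t.toNat a ++ u := by
        rw [← hsu, List.append_assoc, List.drop_left]
      rw [hdrop]
      have htake : (List.replicate t.toNat a ++ u).take t.toNat = List.replicate t.toNat a := by
        rw [List.take_left']; simp
      rw [htake, beq_iff_eq, pv_setlen_one_iff]
      exact ⟨a, by rw [Ne, List.replicate_eq_nil_iff]; omega, by simp⟩

-- with threshold 0 every window slice is empty, so A's first scan never fires
theorem pv_anyA_zero (words : List String) :
    ((PySem.List.pyRange 0 ((words.length : Int) - 0 + 1) 1).any (fun i =>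
        (PySem.Set.ofList (PySem.List.slice words (some i) (some (i + 0)))).length == 1)) = false := by
  rw [List.any_eq_false]
  intro i hi
  rw [PySem.List.mem_pyRange_one] at hi
  rw [PySem.List.slice_toNat words hi.1 (by omega)]
  simp

theorem pv_take_two (xs : List String) (k : Nat) (hk : k + 1 < xs.length) :
    (xs.drop k).take 2 = [xs[k], xs[k + 1]] := by
  rw [List.drop_eq_getElem_cons (by omega), List.drop_eq_getElem_cons hk]
  rfl

theorem pv_join_two (a b : String) :
    (PySem.Str.join " " [a, b]).toList = a.toList ++ ' ' :: b.toList := by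
  rw [PySem.Str.toList_join]
  simp [PySem.Chars.join_cons_cons, PySem.Chars.join_singleton]

-- the two phrase loops agree pointwise: the words carry no spaces, so the joined
-- 2-word phrases are equal exactly when the words are equal index by index
theorem pv_phrase_eq (words : List String) (hns : ∀ w ∈ words, ' ' ∉ w.toList) :
    ((PySem.List.pyRange 0 ((words.length : Int) - 4) 1).any (fun i =>
        PySem.Str.join " " (PySem.List.slice words (some i) (some (i + 2))) ==
        PySem.Str.join " " (PySem.List.slice words (some (i + 2)) (some (i + 4)))))
    = pvAltPhrase words := by
  unfold pvAltPhrase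
  refine PySem.List.any_congr_mem ?_
  intro i hi
  rw [PySem.List.mem_pyRange_one] at hi
  obtain ⟨h0, hlt⟩ := hi
  obtain ⟨k, rfl⟩ : ∃ k : Nat, i = (k : Int) := ⟨i.toNat, (Int.toNat_of_nonneg h0).symm⟩
  have hk4 : k + 4 < words.length := by omega
  have e2 : ((k : Int) + 2) = ((k + 2 : Nat) : Int) := by push_cast; ring
  have e1 : ((k : Int) + 1) = ((k + 1 : Nat) : Int) := by push_cast; ring
  have e3 : ((k : Int) + 3) = ((k + 3 : Nat) : Int) := by push_cast; ring
  have e4 : ((k : Int) + 4) = ((k + 4 : Nat) : Int) := by push_cast; ring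
  rw [e1, e2, e3, e4]
  rw [PySem.List.slice_natCast words k (k+2), PySem.List.slice_natCast words (k+2) (k+4)]
  have d2 : k + 2 - k = 2 := by omega
  have d4 : k + 4 - (k + 2) = 2 := by omega
  rw [d2, d4, pv_take_two words k (by omega), pv_take_two words (k+2) (by omega)]
  rw [PySem.List.pyGetD_natCast, PySem.List.pyGetD_natCast, PySem.List.pyGetD_natCast, PySem.List.pyGetD_natCast]
  rw [List.getD_eq_getElem words _ (by omega), List.getD_eq_getElem words _ (by omega),
      List.getD_eq_getElem words _ (by omega), List.getD_eq_getElem words _ (by omega)]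
  rw [Bool.eq_iff_iff]
  simp only [beq_iff_eq, Bool.and_eq_true]
  constructor
  · intro h
    have h' : (PySem.Str.join " " [words[k], words[k+1]]).toList =
        (PySem.Str.join " " [words[k+2], words[k+3]]).toList := by rw [h]
    rw [pv_join_two, pv_join_two] at h'
    have := pv_sep_unique _ _ _ _ (hns _ (List.getElem_mem _)) (hns _ (List.getElem_mem _)) h'
    exact ⟨String.ext_iff.mpr this.1, String.ext_iff.mpr this.2⟩
  · rintro ⟨h1, h2⟩
    rw [h1, h2]

-- ===== VERDICT (by name: the statement is the Claim_ definition above) =====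
theorem has_repetition_spec : Claim_equal_has_repetition := by
  intro text threshold _ hpre
  unfold Pre_has_repetition at hpre
  unfold Spec_has_repetition has_repetition has_repetition_alt
  by_cases hempty : text == ""
  · simp [hempty]
  · simp only [hempty, Bool.false_eq_true, if_false]
    set words := PySem.Str.split₀ text with hwords
    have hns : ∀ w ∈ words, ' ' ∉ w.toList := fun w hw => pv_nospace_split text w hw
    by_cases hlen : (words.length : Int) < threshold
    · simp [hlen]
    · simp only [hlen, if_false]
      have hphrase := pv_phrase_eq words hns
      by_cases ht1 : 1 ≤ threshold
      · have htn : threshold ≤ (words.length : Int) := by omega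
        have hrun : ((PySem.List.pyRange 0 ((words.length : Int) - threshold + 1) 1).any (fun i =>
            (PySem.Set.ofList (PySem.List.slice words (some i) (some (i + threshold)))).length == 1))
            = pvAltRun threshold words none 0 := by
          rw [Bool.eq_iff_iff, pv_anyA_iff words threshold ht1 htn,
              pv_altRun_top words threshold ht1 htn]
        rw [hrun, decide_eq_true ht1, Bool.true_and]
        cases hr : pvAltRun threshold words none 0
        · simp only [Bool.false_eq_true, if_false, hphrase]
          cases pvAltPhrase words <;> simp
        · rfl
      · have ht0 : threshold = 0 := by omega
        subst ht0
        rw [pv_anyA_zero words]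
        simp only [Bool.false_eq_true, if_false, decide_eq_false ht1, Bool.false_and, hphrase]
        cases pvAltPhrase words <;> simp
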